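-- pv_equiv track=rewrite | github.com/StarMarco/DVAE_torch | training.py | select_dims
-- ===== SOURCE A (Python) =====
-- def select_dims(input_str: str, zenc: int, yenc: int, xenc: int):
--     zdim = 0
--     ydim = 0
--     xdim = 0
--     for inp in input_str:
--         if inp == "z":
--             zdim = zenc
--         elif inp == "x":
--             xdim = xenc
--         elif inp == "y":
--             ydim = yenc
--     return zdim, ydim, xdim
-- ===== SOURCE B (Python) =====
-- def select_dims(input_str: str, zenc: int, yenc: int, xenc: int):
--     return (zenc if "z" in input_str else 0,
--             yenc if "y" in input_str else 0,
--             xenc if "x" in input_str else 0)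
-- ===== Notes on version B (the rewrite author's own statement) =====
-- stated objective: idiomatic
-- what changed: Replaces the stateful character-by-character Python loop with three independent substring membership tests ('z' in s, 'y' in s, 'x' in s), one per returned dimension.
import Mathlib
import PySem

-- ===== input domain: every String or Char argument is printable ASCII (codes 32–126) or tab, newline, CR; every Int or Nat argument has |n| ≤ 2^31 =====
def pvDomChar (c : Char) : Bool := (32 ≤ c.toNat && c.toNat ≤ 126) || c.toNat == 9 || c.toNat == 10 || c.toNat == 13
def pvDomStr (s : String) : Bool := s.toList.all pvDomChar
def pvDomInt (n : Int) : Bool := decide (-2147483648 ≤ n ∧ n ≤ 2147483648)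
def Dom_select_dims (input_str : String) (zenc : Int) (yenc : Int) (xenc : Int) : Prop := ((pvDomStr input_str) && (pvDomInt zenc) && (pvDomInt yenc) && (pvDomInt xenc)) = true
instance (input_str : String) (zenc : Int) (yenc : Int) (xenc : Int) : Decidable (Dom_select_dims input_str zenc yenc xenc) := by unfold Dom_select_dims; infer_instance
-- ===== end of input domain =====

-- ===== PORT A =====
-- Header: B computes each dimension with an independent membership test instead of one stateful loop (idiomatic).
def select_dims (input_str : String) (zenc : Int) (yenc : Int) (xenc : Int) : Int × Int × Int :=
  let st := input_str.toList.foldl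
    (fun (acc : Int × Int × Int) inp =>
      if inp = 'z' then (zenc, acc.2.1, acc.2.2)
      else if inp = 'x' then (acc.1, acc.2.1, xenc)
      else if inp = 'y' then (acc.1, yenc, acc.2.2)
      else acc)
    (0, 0, 0)
  st

-- ===== PORT B =====
def select_dims_alt (input_str : String) (zenc : Int) (yenc : Int) (xenc : Int) : Int × Int × Int :=
  (if input_str.toList.contains 'z' then zenc else 0,
   if input_str.toList.contains 'y' then yenc else 0,
   if input_str.toList.contains 'x' then xenc else 0)

-- ===== PRECONDITION & SPEC =====
def Spec_select_dims (input_str : String) (zenc : Int) (yenc : Int) (xenc : Int) (out : Int × Int × Int) : Prop := out = select_dims_alt input_str zenc yenc xenc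
instance (input_str : String) (zenc : Int) (yenc : Int) (xenc : Int) (out : Int × Int × Int) : Decidable (Spec_select_dims input_str zenc yenc xenc out) := by unfold Spec_select_dims; infer_instance

-- ===== CLAIM (what is proved, stated in full; the proofs are below) =====
def Claim_equal_select_dims : Prop := ∀ (input_str : String) (zenc : Int) (yenc : Int) (xenc : Int), Dom_select_dims input_str zenc yenc xenc → Spec_select_dims input_str zenc yenc xenc (select_dims input_str zenc yenc xenc)

-- ===== LEMMAS AND PROOFS =====

-- ===== VERDICT (by name: the statement is the Claim_ definition above) =====
theorem select_dims_foldl (l : List Char) (zenc yenc xenc a b c : Int) :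
    l.foldl
      (fun (acc : Int × Int × Int) inp =>
        if inp = 'z' then (zenc, acc.2.1, acc.2.2)
        else if inp = 'x' then (acc.1, acc.2.1, xenc)
        else if inp = 'y' then (acc.1, yenc, acc.2.2)
        else acc)
      (a, b, c)
    = (if l.contains 'z' then zenc else a,
       if l.contains 'y' then yenc else b,
       if l.contains 'x' then xenc else c) := by
  induction l generalizing a b c with
  | nil => simp
  | cons h t ih =>
    by_cases hz : h = 'z'
    · subst hz; simp [ih]
    · by_cases hx : h = 'x'
      · subst hx; simp [ih]
      · by_cases hy : h = 'y'
        · subst hy; simp [ih]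
        · simp [ih, hz, hx, hy, Ne.symm hz, Ne.symm hx, Ne.symm hy]

theorem select_dims_spec : Claim_equal_select_dims := by
  intro s zenc yenc xenc _
  unfold Spec_select_dims select_dims select_dims_alt
  simp [select_dims_foldl]
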